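-- pv_equiv track=rewrite | github.com/ydb-platform/ydb | contrib/python/annet/annet/vendors/tabparser.py | _stacked
-- ===== SOURCE A (Python) =====
-- from collections.abc import Callable, Iterator
--
-- class ParserError(Exception):
--     pass
--
-- class _CommentOrEmpty:
--     pass
--
-- class BlockEnd:
--     pass
--
-- def _stacked(lines: Iterator[str], comments: tuple[str, ...]) -> Iterator[tuple[str, ...]]:
--     stack: list[str] = []
--     for level, line in _stripped_indents(lines, comments):
--         level += 1
--         if level > len(stack):
--             stack.append(line)
--         elif level == len(stack):
--             stack[-1] = line
--         else:
--             stack = stack[: level - 1] + [line]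
--         yield tuple(stack)
--
-- def _stripped_indents(lines: Iterator[str], comments: tuple[str, ...]) -> Iterator[tuple[int, str]]:
--     indents: list[int] = []
--     curr_level = 0
--     g_level = None
--
--     for number, (level, line) in enumerate(_parsed_indents(lines, comments), start=1):
--         if isinstance(line, str):
--             if g_level is None:
--                 g_level = level
--             level = level - (g_level or 0)
--             if level < 0:
--                 raise ParserError("Invalid top indentation: line %d: %s" % (number, line))
--
--             if level > curr_level:
--                 indents.append(level - curr_level)
--                 curr_level += level - curr_level
--             elif level < curr_level:
--                 while curr_level > level and len(indents):
--                     curr_level -= indents.pop()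
--                 if curr_level != level:
--                     raise ParserError("Invalid top indentation: line %d: %s" % (number, line))
--
--             yield (len(indents), line)
--
--         elif line is BlockEnd:
--             indents = []
--             curr_level = 0
--             g_level = None
--
-- def _parsed_indents(
--     lines: Iterator[str], comments: tuple[str, ...]
-- ) -> Iterator[tuple[int, str | type[BlockEnd] | type[_CommentOrEmpty]]]:
--     for line in _filtered_lines(lines, comments):
--         if isinstance(line, str):
--             yield (_parse_indent(line), line.strip())
--         else:
--             yield (0, line)
--
-- def _filtered_lines(
--     lines: Iterator[str], comments: tuple[str, ...]
-- ) -> Iterator[str | type[BlockEnd] | type[_CommentOrEmpty]]: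
--     for line in lines:
--         stripped = line.strip()
--         # TODO Это для хуавей, так что хелпер нужно унести в Formatter
--         if "#" in comments and line.startswith("#"):
--             yield BlockEnd
--         elif len(stripped) == 0 or stripped.startswith(comments):
--             yield _CommentOrEmpty
--         else:
--             yield line
--
-- def _parse_indent(line: str) -> int:
--     level = 0
--     for ch in line:
--         if ch in ("\t", " "):
--             level += 1
--         else:
--             break
--     return level
-- ===== SOURCE B (Python) =====
-- class ParserError(Exception):
--     pass
--
--
-- def _stacked(lines, comments):
--     # Single pass over the raw lines: one stack of absolute adjusted indents,
--     # one path stack of stripped lines, kept in lockstep.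
--     abs_stack = []   # absolute (offset-adjusted) indent of each open level
--     path = []        # stripped line opening each level
--     g_level = None   # indent of the first content line of the current block
--     number = 0
--     for line in lines:
--         number += 1
--         if "#" in comments and line.startswith("#"):
--             abs_stack, path, g_level = [], [], None
--             continue
--         stripped = line.strip()
--         if not stripped or stripped.startswith(comments):
--             continue
--         ind = 0
--         while ind < len(line) and line[ind] in (" ", "\t"):
--             ind += 1
--         if g_level is None:
--             g_level = ind
--         lev = ind - g_level
--         if lev < 0:
--             raise ParserError("Invalid top indentation: line %d: %s" % (number, stripped))
--         if not abs_stack or lev > abs_stack[-1]: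
--             abs_stack.append(lev)
--         else:
--             while abs_stack and abs_stack[-1] > lev:
--                 abs_stack.pop()
--             if not abs_stack or abs_stack[-1] != lev:
--                 raise ParserError("Invalid top indentation: line %d: %s" % (number, stripped))
--         del path[len(abs_stack) - 1:]
--         path.append(stripped)
--         yield tuple(path)
-- ===== Notes on version B (the rewrite author's own statement) =====
-- stated objective: alternative
-- what changed: Replaced the four-stage generator pipeline (filter, parse, delta-indent stack with separate current-level counter, then a second path-stacking pass) by a single pass over the raw lines that keeps one stack of absolute adjusted indents and the path stack in lockstep.
import Mathlib
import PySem

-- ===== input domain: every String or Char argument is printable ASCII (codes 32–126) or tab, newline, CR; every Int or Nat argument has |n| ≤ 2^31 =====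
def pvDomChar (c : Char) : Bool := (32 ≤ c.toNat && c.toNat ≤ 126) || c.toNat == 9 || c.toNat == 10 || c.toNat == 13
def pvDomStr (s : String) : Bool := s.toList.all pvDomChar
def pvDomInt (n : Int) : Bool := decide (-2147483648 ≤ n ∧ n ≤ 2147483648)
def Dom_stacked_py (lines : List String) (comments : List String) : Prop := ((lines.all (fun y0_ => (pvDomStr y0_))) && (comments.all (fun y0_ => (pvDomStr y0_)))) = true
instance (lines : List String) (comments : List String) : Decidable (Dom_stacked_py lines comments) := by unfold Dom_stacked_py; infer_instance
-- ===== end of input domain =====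

-- B replaces A's four-stage generator pipeline by one pass with an absolute-indent stack
-- and the path stack in lockstep (objective: alternative decomposition); return value only —
-- both versions raise ParserError on ill-indented input (excluded by Pre_).

-- ===== PORT A =====
-- line classification produced by _filtered_lines / _parsed_indents
inductive PLine
  | blockEnd
  | commentOrEmpty
  | content (lvl : Int) (s : String)

-- _parse_indent: count leading '\t'/' ' characters, break at the first other one
def parseIndentA : List Char → Int
  | [] => 0
  | c :: rest => if c = '\t' ∨ c = ' ' then 1 + parseIndentA rest else 0

-- _filtered_lines fused with _parsed_indents on one line (both are per-line maps)
def parseLineA (comments : List String) (line : String) : PLine :=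
  let stripped := PySem.Str.strip line
  if comments.contains "#" && PySem.Str.startswith line "#" then .blockEnd
  else if PySem.Str.len stripped == 0 || comments.any (fun c => PySem.Str.startswith stripped c) then .commentOrEmpty
  else .content (parseIndentA line.toList) (PySem.Str.strip line)

-- state of _stripped_indents; err = the generator has raised ParserError
structure SIState where
  indents : List Int      -- Python's `indents` list of deltas, TOP AT HEAD
  curr : Int
  g : Option Int
  err : Bool
  out : List (Nat × String)   -- the yielded (len(indents), line) pairs

-- the `while curr_level > level and len(indents)` pop loop
def popDeltas : List Int → Int → Int → List Int × Int
  | [], curr, _ => ([], curr)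
  | d :: rest, curr, lvl => if curr > lvl then popDeltas rest (curr - d) lvl else (d :: rest, curr)

def siStep (st : SIState) (p : PLine) : SIState :=
  match p with
  | .commentOrEmpty => st
  | .blockEnd => if st.err then st else { st with indents := [], curr := 0, g := none }
  | .content lvl s =>
    if st.err then st
    else
      let g := st.g.getD lvl
      let level := lvl - g
      if level < 0 then { st with g := some g, err := true }
      else if level > st.curr then
        let indents := (level - st.curr) :: st.indents
        { indents := indents, curr := level, g := some g, err := false,
          out := st.out ++ [(indents.length, s)] }
      else if level < st.curr then
        let pc := popDeltas st.indents st.curr level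
        if pc.2 ≠ level then { indents := pc.1, curr := pc.2, g := some g, err := true, out := st.out }
        else { indents := pc.1, curr := pc.2, g := some g, err := false,
               out := st.out ++ [(pc.1.length, s)] }
      else { st with g := some g, out := st.out ++ [(st.indents.length, s)] }

def siRun (comments : List String) (lines : List String) (st : SIState) : SIState :=
  (lines.map (parseLineA comments)).foldl siStep st

-- _stacked's consumer loop: level = n+1; append / replace-last / truncate-and-append; yield
def stackedStep (st : List String × List (List String)) (p : Nat × String) : List String × List (List String) :=
  let level := p.1 + 1
  if level > st.1.length then
    let s' := st.1 ++ [p.2]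
    (s', st.2 ++ [s'])
  else if level == st.1.length then
    let s' := st.1.dropLast ++ [p.2]
    (s', st.2 ++ [s'])
  else
    let s' := st.1.take (level - 1) ++ [p.2]
    (s', st.2 ++ [s'])

def stacked_py (lines : List String) (comments : List String) : List (List String) :=
  ((siRun comments lines ⟨[], 0, none, false, []⟩).out.foldl stackedStep ([], [])).2

-- ===== PORT B =====
-- Source B's leading-whitespace index loop
def leadWS : List Char → Int
  | [] => 0
  | c :: rest => if c = ' ' ∨ c = '\t' then 1 + leadWS rest else 0

-- Source B's `while abs_stack and abs_stack[-1] > lev: pop` (top at head)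
def popAbs : List Int → Int → List Int
  | [], _ => []
  | a :: rest, lev => if a > lev then popAbs rest lev else a :: rest

structure BState where
  abs : List Int          -- absolute adjusted indent of each open level, TOP AT HEAD
  path : List String
  g : Option Int
  err : Bool              -- ParserError raised
  acc : List (List String)

def bStep (comments : List String) (st : BState) (line : String) : BState :=
  if st.err then st
  else if comments.contains "#" && PySem.Str.startswith line "#" then
    { st with abs := [], path := [], g := none }
  else
    let stripped := PySem.Str.strip line
    if PySem.Str.len stripped == 0 || comments.any (fun c => PySem.Str.startswith stripped c) then st
    else
      let ind := leadWS line.toList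
      let g := st.g.getD ind
      let lev := ind - g
      if lev < 0 then { st with g := some g, err := true }
      else
        -- push when empty or deeper; otherwise pop to the enclosing level and demand an exact match
        let ab? : Option (List Int) :=
          match st.abs with
          | [] => some [lev]
          | a :: r =>
            if lev > a then some (lev :: a :: r)
            else
              match popAbs (a :: r) lev with
              | [] => none
              | a' :: r' => if a' = lev then some (a' :: r') else none
        match ab? with
        | none => { st with g := some g, err := true }
        | some ab =>
          -- Source B: del path[len(abs_stack)-1:]; path.append(stripped)
          let path' := st.path.take (ab.length - 1) ++ [stripped]
          { abs := ab, path := path', g := some g, err := false, acc := st.acc ++ [path'] }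

def stacked_py_alt (lines : List String) (comments : List String) : List (List String) :=
  (lines.foldl (bStep comments) ⟨[], [], none, false, []⟩).acc

-- ===== PRECONDITION & SPEC =====
-- Pre_ = the input's indentation profile is well formed (exactly where _stacked returns without
-- raising ParserError): in each '#'-delimited block, every content line's offset-adjusted indent
-- is nonnegative and every dedent lands exactly on an enclosing indent level.  This is a property
-- of the leading-whitespace counts of the lines alone; okLines checks it with a stack of active
-- indent amounts and never builds either program's output.
-- leading-indent amount of a line, for Pre_: length of the leading run of blanks/tabs
def indentOf (cs : List Char) : Int :=
  ((cs.takeWhile (fun c => c == ' ' || c == '\t')).length : Int)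

def okLines (comments : List String) : List String → List Int → Option Int → Bool
  | [], _, _ => true
  | line :: rest, abs, g =>
    if comments.contains "#" && PySem.Str.startswith line "#" then okLines comments rest [] none
    else
      let stripped := PySem.Str.strip line
      if PySem.Str.len stripped == 0 || comments.any (fun c => PySem.Str.startswith stripped c) then
        okLines comments rest abs g
      else
        let ind := indentOf line.toList
        let g' := g.getD ind
        let lev := ind - g'
        if lev < 0 then false
        else
          match abs with
          | [] => okLines comments rest [lev] (some g')
          | a :: r =>
            if lev > a then okLines comments rest (lev :: a :: r) (some g')
            else
              match popAbs (a :: r) lev with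
              | [] => false
              | a' :: r' => if a' = lev then okLines comments rest (a' :: r') (some g') else false

def Pre_stacked_py (lines : List String) (comments : List String) : Prop :=
  okLines comments lines [] none = true
instance (lines : List String) (comments : List String) : Decidable (Pre_stacked_py lines comments) := by
  unfold Pre_stacked_py; infer_instance

def pvWitness_stacked_py : List String × List String := (["a", " b", "c"], ["!"])

def Spec_stacked_py (lines : List String) (comments : List String) (out : List (List String)) : Prop := out = stacked_py_alt lines comments
instance (lines : List String) (comments : List String) (out : List (List String)) : Decidable (Spec_stacked_py lines comments out) := by unfold Spec_stacked_py; infer_instance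

-- ===== CLAIM (what is proved, stated in full; the proofs are below) =====
def Claim_equal_stacked_py : Prop := ∀ (lines : List String) (comments : List String), Dom_stacked_py lines comments → Pre_stacked_py lines comments → Spec_stacked_py lines comments (stacked_py lines comments)

-- ===== LEMMAS AND PROOFS =====

-- absolute levels (bottom 0) corresponding to A's delta list
def absOf : List Int → List Int
  | [] => [0]
  | d :: rest => (d + (absOf rest).headD 0) :: absOf rest

theorem absOf_ne_nil (l : List Int) : absOf l ≠ [] := by
  cases l <;> simp [absOf]

theorem absOf_length (l : List Int) : (absOf l).length = l.length + 1 := by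
  induction l with
  | nil => simp [absOf]
  | cons d r ih => simp [absOf, ih]

theorem leadWS_eq (cs : List Char) : leadWS cs = parseIndentA cs := by
  induction cs with
  | nil => rfl
  | cons c rest ih =>
    by_cases h1 : c = ' ' <;> by_cases h2 : c = '\t' <;>
      simp [leadWS, parseIndentA, h1, h2, ih]

theorem indentOf_eq (cs : List Char) : indentOf cs = leadWS cs := by
  induction cs with
  | nil => rfl
  | cons c rest ih =>
    by_cases h1 : c = ' ' <;> by_cases h2 : c = '\t' <;>
      simp [indentOf, leadWS, List.takeWhile_cons, h1, h2, ← ih, indentOf] <;> omega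

theorem popAbs_length_le (l : List Int) (lev : Int) : (popAbs l lev).length ≤ l.length := by
  induction l with
  | nil => simp [popAbs]
  | cons a r ih =>
    by_cases h : a > lev <;> simp [popAbs, h]
    omega

theorem pop_corr (indents : List Int) (lev : Int) (hlev : 0 ≤ lev)
    (hpos : ∀ d ∈ indents, 0 < d) :
    popAbs (absOf indents) lev
      = absOf (popDeltas indents ((absOf indents).headD 0) lev).1 ∧
    (popDeltas indents ((absOf indents).headD 0) lev).2
      = (absOf (popDeltas indents ((absOf indents).headD 0) lev).1).headD 0 ∧
    (∀ d ∈ (popDeltas indents ((absOf indents).headD 0) lev).1, 0 < d) := by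
  induction indents with
  | nil =>
    simp [absOf, popDeltas, popAbs]
    omega
  | cons d r ih =>
    have hr : ∀ x ∈ r, 0 < x := fun x hx => hpos x (by simp [hx])
    by_cases h : lev < d + (absOf r).headD 0
    · simp only [List.headD_eq_head?_getD] at h
      simp [absOf, popDeltas, popAbs, h, gt_iff_lt, add_sub_cancel_left]
      simpa [absOf] using ih hr
    · simp only [List.headD_eq_head?_getD] at h
      simp [absOf, popDeltas, popAbs, h, gt_iff_lt]
      exact ⟨hpos d (by simp), hr⟩

-- siStep changes the non-out fields independently of out and only ever appends to out
theorem siStep_split (ind : List Int) (cur : Int) (g : Option Int) (e : Bool)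
    (x : List (Nat × String)) (p : PLine) :
    siStep ⟨ind, cur, g, e, x⟩ p
      = { siStep ⟨ind, cur, g, e, []⟩ p with
          out := x ++ (siStep ⟨ind, cur, g, e, []⟩ p).out } := by
  cases p <;> simp only [siStep] <;> (try split_ifs) <;> simp

theorem siRun_split (comments : List String) (lines : List String) :
    ∀ (ind : List Int) (cur : Int) (g : Option Int) (e : Bool) (x : List (Nat × String)),
    siRun comments lines ⟨ind, cur, g, e, x⟩
      = { siRun comments lines ⟨ind, cur, g, e, []⟩ with
          out := x ++ (siRun comments lines ⟨ind, cur, g, e, []⟩).out } := by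
  induction lines with
  | nil => intro ind cur g e x; simp [siRun]
  | cons l rest ih =>
    intro ind cur g e x
    simp only [siRun, List.map_cons, List.foldl_cons]
    rw [siStep_split]
    rcases h : siStep ⟨ind, cur, g, e, []⟩ (parseLineA comments l) with ⟨i', c', g', e', o'⟩
    show (List.map (parseLineA comments) rest).foldl siStep ⟨i', c', g', e', x ++ o'⟩ = _
    have h1 := ih i' c' g' e' (x ++ o')
    have h2 := ih i' c' g' e' o'
    simp only [siRun] at h1 h2
    rw [h1, h2]
    simp

theorem stackedStep_zero (stack : List String) (acc : List (List String)) (s : String) :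
    stackedStep (stack, acc) (0, s) = ([s], acc ++ [[s]]) := by
  rcases stack with _ | ⟨x, xs⟩
  · simp [stackedStep]
  · rcases xs with _ | ⟨y, ys⟩ <;> simp [stackedStep]

theorem siRun_out (comments : List String) (lines : List String)
    (ind : List Int) (cur : Int) (g : Option Int) (e : Bool) (x : List (Nat × String)) :
    (siRun comments lines ⟨ind, cur, g, e, x⟩).out
      = x ++ (siRun comments lines ⟨ind, cur, g, e, []⟩).out := by
  rw [siRun_split]

-- the main coupling invariant: running A's remaining pipeline from a related state
-- produces the same emitted paths as running B's single pass
theorem main_inv (comments : List String) :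
    ∀ (lines : List String) (indents : List Int) (g : Option Int)
      (abs : List Int) (stack pathB : List String) (acc : List (List String)),
    (∀ d ∈ indents, 0 < d) →
    (g = none → indents = [] ∧ abs = []) →
    (g ≠ none → abs = absOf indents ∧ pathB = stack ∧ stack.length = abs.length) →
    okLines comments lines abs g = true →
    ((siRun comments lines ⟨indents, abs.headD 0, g, false, []⟩).out.foldl stackedStep (stack, acc)).2
      = (lines.foldl (bStep comments) ⟨abs, pathB, g, false, acc⟩).acc := by
  intro lines
  induction lines with
  | nil =>
    intro indents g abs stack pathB acc _ _ _ _
    simp [siRun]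
  | cons line rest ih =>
    intro indents g abs stack pathB acc hpos hnone hsome hok
    rw [show siRun comments (line :: rest) ⟨indents, abs.headD 0, g, false, []⟩
        = siRun comments rest (siStep ⟨indents, abs.headD 0, g, false, []⟩ (parseLineA comments line)) from rfl]
    rw [show (line :: rest).foldl (bStep comments) ⟨abs, pathB, g, false, acc⟩
        = rest.foldl (bStep comments) (bStep comments ⟨abs, pathB, g, false, acc⟩ line) from rfl]
    rw [okLines] at hok
    simp only [indentOf_eq] at hok
    by_cases hBE : (comments.contains "#" && PySem.Str.startswith line "#") = true
    · -- '#' block end: both sides reset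
      simp only [hBE, if_true] at hok
      simp only [parseLineA, hBE, if_true]
      simp only [siStep, Bool.false_eq_true, if_false]
      simp only [bStep, hBE, Bool.false_eq_true, if_false, if_true]
      exact ih [] none [] stack [] acc (by simp) (fun _ => ⟨rfl, rfl⟩)
        (fun h => absurd rfl h) hok
    · -- not a block end
      simp only [hBE, Bool.false_eq_true, if_false] at hok
      by_cases hCE : (PySem.Str.len (PySem.Str.strip line) == 0
          || comments.any (fun c => PySem.Str.startswith (PySem.Str.strip line) c)) = true
      · -- comment or empty: everything unchanged
        simp only [hCE, if_true] at hok
        simp only [parseLineA, hBE, Bool.false_eq_true, if_false, hCE, if_true]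
        simp only [siStep]
        simp only [bStep, hBE, Bool.false_eq_true, if_false, hCE, if_true]
        exact ih indents g abs stack pathB acc hpos hnone hsome hok
      · -- content line
        simp only [hCE, Bool.false_eq_true, if_false] at hok
        simp only [parseLineA, hBE, Bool.false_eq_true, if_false, hCE]
        simp only [bStep, hBE, Bool.false_eq_true, if_false, hCE]
        rw [← leadWS_eq]
        by_cases hneg : leadWS line.toList - g.getD (leadWS line.toList) < 0
        · rw [if_pos hneg] at hok; exact absurd hok (by simp)
        rw [if_neg hneg] at hok
        rw [if_neg hneg]
        cases g with
        | none =>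
          obtain ⟨hi, ha⟩ := hnone rfl
          subst hi; subst ha
          simp only [Option.getD_none, sub_self] at hok ⊢
          simp only [List.headD_nil]
          rw [show siStep ⟨[], 0, none, false, []⟩
                (PLine.content (leadWS line.toList) (PySem.Str.strip line))
              = ⟨[], 0, some (leadWS line.toList), false, [(0, PySem.Str.strip line)]⟩ from by
            simp [siStep]]
          rw [siRun_out, List.foldl_append, List.foldl_cons, List.foldl_nil, stackedStep_zero]
          rw [show List.take (([0] : List Int).length - 1) pathB = [] from by simp]
          rw [List.nil_append]
          exact ih [] (some (leadWS line.toList)) [0] [PySem.Str.strip line]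
            [PySem.Str.strip line] (acc ++ [[PySem.Str.strip line]])
            (by simp) (by simp) (fun _ => ⟨rfl, rfl, rfl⟩) hok
        | some v =>
          simp only [Option.getD_some] at hneg
          obtain ⟨habs, hpb, hlen⟩ := hsome (by simp)
          subst habs
          rw [hpb]
          rcases hA : absOf indents with _ | ⟨a, r⟩
          · exact absurd hA (absOf_ne_nil _)
          rw [hA] at hok hlen
          simp only [Option.getD_some] at hok ⊢
          simp only [List.length_cons] at hlen
          have hlenI : indents.length = r.length := by
            have := absOf_length indents; rw [hA] at this
            simp only [List.length_cons] at this; omega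
          by_cases hgt : leadWS line.toList - v > a
          · -- indent deeper: push one level
            rw [if_pos hgt] at hok
            rw [if_pos hgt]
            rw [show siStep ⟨indents, (a :: r).headD 0, some v, false, []⟩
                  (PLine.content (leadWS line.toList) (PySem.Str.strip line))
                = ⟨(leadWS line.toList - v - a) :: indents, leadWS line.toList - v, some v, false,
                   [(((leadWS line.toList - v - a) :: indents).length, PySem.Str.strip line)]⟩ from by
              simp only [siStep, Option.getD_some, List.headD_cons]
              rw [if_neg (by simp : ¬ false = true), if_neg hneg, if_pos hgt]
              simp only [List.nil_append]]
            rw [siRun_out, List.foldl_append, List.foldl_cons, List.foldl_nil]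
            rw [show stackedStep (stack, acc)
                  (((leadWS line.toList - v - a) :: indents).length, PySem.Str.strip line)
                = (stack ++ [PySem.Str.strip line], acc ++ [stack ++ [PySem.Str.strip line]]) from by
              simp only [stackedStep, List.length_cons]
              rw [if_pos (by omega)]]
            simp only [List.length_cons, Nat.add_sub_cancel]
            rw [show List.take (r.length + 1) stack = stack from
              List.take_of_length_le (by omega)]
            have habs' : absOf ((leadWS line.toList - v - a) :: indents)
                = (leadWS line.toList - v) :: a :: r := by
              simp [absOf, hA]
            exact ih ((leadWS line.toList - v - a) :: indents) (some v)
              ((leadWS line.toList - v) :: a :: r)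
              (stack ++ [PySem.Str.strip line]) (stack ++ [PySem.Str.strip line])
              (acc ++ [stack ++ [PySem.Str.strip line]])
              (by intro d hd
                  rcases List.mem_cons.mp hd with hd | hd
                  · omega
                  · exact hpos d hd)
              (by simp) (fun _ => ⟨habs'.symm, rfl, by simp; omega⟩) hok
          · rw [if_neg hgt] at hok
            rw [if_neg hgt]
            by_cases heq2 : leadWS line.toList - v = a
            · -- same level: replace the top of the path
              rw [show popAbs (a :: r) (leadWS line.toList - v) = a :: r from by
                simp [popAbs]; omega] at hok ⊢
              simp only [if_pos heq2.symm] at hok ⊢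
              rw [show siStep ⟨indents, (a :: r).headD 0, some v, false, []⟩
                    (PLine.content (leadWS line.toList) (PySem.Str.strip line))
                  = ⟨indents, a, some v, false, [(indents.length, PySem.Str.strip line)]⟩ from by
                simp only [siStep, Option.getD_some, List.headD_cons]
                rw [if_neg (by simp : ¬ false = true), if_neg hneg, if_neg hgt,
                    if_neg (by omega : ¬ leadWS line.toList - v < a)]
                simp only [List.nil_append]]
              rw [siRun_out, List.foldl_append, List.foldl_cons, List.foldl_nil]
              rw [show stackedStep (stack, acc) (indents.length, PySem.Str.strip line)
                  = (List.take r.length stack ++ [PySem.Str.strip line],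
                     acc ++ [List.take r.length stack ++ [PySem.Str.strip line]]) from by
                simp only [stackedStep]
                rw [if_neg (by omega), if_pos (by simp; omega)]
                rw [List.dropLast_eq_take, show stack.length - 1 = r.length from by omega]]
              simp only [List.length_cons, Nat.add_sub_cancel]
              exact ih indents (some v) (a :: r)
                (List.take r.length stack ++ [PySem.Str.strip line])
                (List.take r.length stack ++ [PySem.Str.strip line])
                (acc ++ [List.take r.length stack ++ [PySem.Str.strip line]])
                hpos (by simp) (fun _ => ⟨hA.symm, rfl, by simp; omega⟩) hok
            · -- dedent: pop to an enclosing level, which must match exactly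
              have hlt : leadWS line.toList - v < a := by omega
              obtain ⟨e1, e2, e3⟩ := pop_corr indents (leadWS line.toList - v) (by omega) hpos
              rw [hA] at e1 e2 e3
              simp only [List.headD_cons] at e1 e2 e3
              rcases hA2 : absOf (popDeltas indents a (leadWS line.toList - v)).1 with _ | ⟨a2, r2⟩
              · exact absurd hA2 (absOf_ne_nil _)
              rw [hA2] at e1 e2
              simp only [List.headD_cons] at e2
              rw [e1] at hok ⊢
              by_cases ha2 : a2 = leadWS line.toList - v
              · simp only [ha2, List.headD_cons] at hok ⊢
                rw [ha2] at hA2 e2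
                have hlen2 : (popDeltas indents a (leadWS line.toList - v)).1.length = r2.length := by
                  have := absOf_length (popDeltas indents a (leadWS line.toList - v)).1
                  rw [hA2] at this
                  simp only [List.length_cons] at this; omega
                have hpopped : r2.length < r.length := by
                  have h1 : popAbs (a :: r) (leadWS line.toList - v)
                      = popAbs r (leadWS line.toList - v) := by
                    simp only [popAbs]; rw [if_pos (by omega)]
                  have h2 := popAbs_length_le r (leadWS line.toList - v)
                  rw [← h1, e1, ha2] at h2
                  simp only [List.length_cons] at h2
                  omega
                rw [show siStep ⟨indents, a, some v, false, []⟩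
                      (PLine.content (leadWS line.toList) (PySem.Str.strip line))
                    = ⟨(popDeltas indents a (leadWS line.toList - v)).1, leadWS line.toList - v,
                       some v, false,
                       [((popDeltas indents a (leadWS line.toList - v)).1.length,
                         PySem.Str.strip line)]⟩ from by
                  simp only [siStep, Option.getD_some]
                  rw [if_neg (by simp : ¬ false = true), if_neg hneg, if_neg hgt, if_pos hlt,
                      if_neg (show ¬ (popDeltas indents a (leadWS line.toList - v)).2
                          ≠ leadWS line.toList - v from by rw [e2]; simp)]
                  rw [e2]
                  simp only [List.nil_append]]
                rw [siRun_out, List.foldl_append, List.foldl_cons, List.foldl_nil]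
                rw [show stackedStep (stack, acc)
                      ((popDeltas indents a (leadWS line.toList - v)).1.length, PySem.Str.strip line)
                    = (List.take r2.length stack ++ [PySem.Str.strip line],
                       acc ++ [List.take r2.length stack ++ [PySem.Str.strip line]]) from by
                  simp only [stackedStep]
                  rw [if_neg (by omega), if_neg (by simp; omega)]
                  simp only [Nat.add_sub_cancel]
                  rw [hlen2]]
                exact ih (popDeltas indents a (leadWS line.toList - v)).1 (some v)
                  ((leadWS line.toList - v) :: r2)
                  (List.take r2.length stack ++ [PySem.Str.strip line])
                  (List.take r2.length stack ++ [PySem.Str.strip line])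
                  (acc ++ [List.take r2.length stack ++ [PySem.Str.strip line]])
                  e3 (by simp) (fun _ => ⟨hA2.symm, rfl, by
                    have hle : r2.length ≤ stack.length := by omega
                    simp [List.length_take, Nat.min_eq_left hle]⟩) hok
              · simp only [if_neg ha2] at hok
                exact absurd hok (by simp)

-- ===== VERDICT (by name: the statement is the Claim_ definition above) =====
theorem stacked_py_spec : Claim_equal_stacked_py := by
  intro lines comments _hd hpre
  unfold Spec_stacked_py stacked_py stacked_py_alt
  exact main_inv comments lines [] none [] [] [] []
    (by simp) (fun _ => ⟨rfl, rfl⟩) (fun h => absurd rfl h) hpre
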